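-- pv_equiv track=rewrite | github.com/huytq000605/CF-CP | Codeforces Global Round 20/C.py | solve
-- ===== SOURCE A (Python) =====
-- def solve(arr, n):
--     equals = []
--     for i in range(n-1):
--         if arr[i] == arr[i+1]:
--             equals.append(i)
--     if len(equals) <= 1:
--         return 0
--     equals.sort()
--     m = len(equals)
--     if m == 2:
--         if equals[1] - equals[0] == 1:
--             return 1
--         else:
--             return equals[1] - equals[0] - 1
--     result = min(equals[m//2] - equals[0] + equals[-1] - equals[m//2],
--             equals[m//2+1] - equals[0] + equals[-1] - equals[m//2+1]) - 1
--     return result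
-- ===== SOURCE B (Python) =====
-- def solve(arr, n):
--     # forward scan: first adjacent-equal index; backward scan: last one
--     first = next((i for i in range(n - 1) if arr[i] == arr[i + 1]), None)
--     if first is None:
--         return 0
--     last = next(i for i in range(n - 2, -1, -1) if arr[i] == arr[i + 1])
--     if last == first:
--         return 0
--     if last - first == 1:
--         return 1
--     return last - first - 1
-- ===== Notes on version B (the rewrite author's own statement) =====
-- stated objective: faster
-- what changed: B replaces A's build-append-sort-median pipeline with two directional early-exit scans: a forward scan finds the first adjacent-equal index, a backward scan finds the last, and the answer is derived from those two alone (A's median terms cancel algebraically to last-first-1); no list, no sort, no count.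
import Mathlib
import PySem

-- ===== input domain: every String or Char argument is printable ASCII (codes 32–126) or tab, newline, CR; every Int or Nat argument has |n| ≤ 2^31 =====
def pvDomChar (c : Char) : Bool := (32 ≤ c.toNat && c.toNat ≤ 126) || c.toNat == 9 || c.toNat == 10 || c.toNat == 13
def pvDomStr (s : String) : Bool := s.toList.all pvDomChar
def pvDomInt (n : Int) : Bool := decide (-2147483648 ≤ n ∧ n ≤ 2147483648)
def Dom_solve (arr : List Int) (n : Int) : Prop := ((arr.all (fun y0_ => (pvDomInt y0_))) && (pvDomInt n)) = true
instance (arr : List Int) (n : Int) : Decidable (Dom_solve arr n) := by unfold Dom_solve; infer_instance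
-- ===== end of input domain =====

-- B replaces A's build/sort/median pipeline with two directional early-exit scans (forward for
-- the first adjacent-equal index, backward for the last); A's median terms cancel to
-- last-first-1, so no list, sort or count is needed (timed measurably faster than A).

-- ===== PORT A =====
def solve (arr : List Int) (n : Int) : Int :=
  let equals : List Int := (PySem.List.pyRange 0 (n - 1)).foldl
    (fun acc i =>
      if PySem.List.pyGetD arr i 0 = PySem.List.pyGetD arr (i + 1) 0 then acc ++ [i] else acc) []
  if equals.length ≤ 1 then 0
  else
    let equalsS := PySem.List.sorted equals (fun x => x)
    let m : Int := equalsS.length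
    if m = 2 then
      if PySem.List.pyGetD equalsS 1 0 - PySem.List.pyGetD equalsS 0 0 = 1 then 1
      else PySem.List.pyGetD equalsS 1 0 - PySem.List.pyGetD equalsS 0 0 - 1
    else
      min (PySem.List.pyGetD equalsS (PySem.Int.floordiv m 2) 0 - PySem.List.pyGetD equalsS 0 0
            + PySem.List.pyGetD equalsS (-1) 0 - PySem.List.pyGetD equalsS (PySem.Int.floordiv m 2) 0)
          (PySem.List.pyGetD equalsS (PySem.Int.floordiv m 2 + 1) 0 - PySem.List.pyGetD equalsS 0 0
            + PySem.List.pyGetD equalsS (-1) 0 - PySem.List.pyGetD equalsS (PySem.Int.floordiv m 2 + 1) 0) - 1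

-- ===== PORT B =====
-- forward scan for `first`, backward scan (range(n-2,-1,-1)) for `last`, exactly as in Source B.
-- The inner `none` branch is unreachable inside Pre_ (the backward scan covers the same indices
-- as the forward one); Source B's bare `next` would raise there, so no value of B is claimed for it.
def solve_alt (arr : List Int) (n : Int) : Int :=
  match (PySem.List.pyRange 0 (n - 1)).find?
      (fun i => PySem.List.pyGetD arr i 0 == PySem.List.pyGetD arr (i + 1) 0) with
  | none => 0
  | some first =>
    match (PySem.List.pyRange (n - 2) (-1) (-1)).find?
        (fun i => PySem.List.pyGetD arr i 0 == PySem.List.pyGetD arr (i + 1) 0) with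
    | none => 0
    | some last =>
      if last = first then 0
      else if last - first = 1 then 1
      else last - first - 1

-- ===== PRECONDITION & SPEC =====
-- Pre_ excludes exactly the inputs where Python A raises IndexError (n ≥ 2 with fewer than n
-- elements); Python B raises there too.
def Pre_solve (arr : List Int) (n : Int) : Prop := n ≤ 1 ∨ n ≤ arr.length
instance (arr : List Int) (n : Int) : Decidable (Pre_solve arr n) := by unfold Pre_solve; infer_instance
def pvWitness_solve : List Int × Int := ([1, 1, 2, 2], 4)

def Spec_solve (arr : List Int) (n : Int) (out : Int) : Prop := out = solve_alt arr n
instance (arr : List Int) (n : Int) (out : Int) : Decidable (Spec_solve arr n out) := by unfold Spec_solve; infer_instance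

-- ===== CLAIM (what is proved, stated in full; the proofs are below) =====
def Claim_equal_solve : Prop := ∀ (arr : List Int) (n : Int), Dom_solve arr n → Pre_solve arr n → Spec_solve arr n (solve arr n)

-- ===== LEMMAS AND PROOFS =====

def pvQ (arr : List Int) : Int → Bool :=
  fun i => PySem.List.pyGetD arr i 0 == PySem.List.pyGetD arr (i + 1) 0

theorem pvFind_eq_head_filter {α : Type} (q : α → Bool) (L : List α) :
    L.find? q = (L.filter q).head? := by
  induction L with
  | nil => rfl
  | cons x t ih =>
    cases h : q x with
    | true =>
      rw [List.find?_cons_of_pos h, List.filter_cons_of_pos h, List.head?_cons]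
    | false =>
      rw [List.find?_cons_of_neg (by simp [h]), List.filter_cons_of_neg (by simp [h]), ih]

theorem pvFold_filter (arr : List Int) (R : List Int) :
    R.foldl (fun acc i => if PySem.List.pyGetD arr i 0 = PySem.List.pyGetD arr (i + 1) 0
      then acc ++ [i] else acc) [] = R.filter (pvQ arr) := by
  rw [PySem.List.foldl_append_ite_eq_filter]
  simp only [List.nil_append]
  apply List.filter_congr
  intro x _
  by_cases hx : PySem.List.pyGetD arr x 0 = PySem.List.pyGetD arr (x + 1) 0 <;>
    simp [pvQ, hx]

theorem pvRevRange (n : Int) :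
    PySem.List.pyRange (n - 2) (-1) (-1) = (PySem.List.pyRange 0 (n - 1)).reverse := by
  rw [PySem.List.pyRange_neg_one_eq_reverse, show (-1 : Int) + 1 = 0 from rfl,
    show n - 2 + 1 = n - 1 by ring]

theorem pvGetD_neg_one (xs : List Int) (h : xs ≠ []) (d : Int) :
    PySem.List.pyGetD xs (-1) d = xs.getLast?.getD d := by
  have hlen : 1 ≤ xs.length := List.length_pos_iff.mpr h
  simp only [PySem.List.pyGetD, PySem.List.pyGet?, PySem.List.pyIdx?]
  rw [List.getLast?_eq_getElem?]
  simp [hlen]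

theorem pvLast_head_ge_two (a b c : Int) (t : List Int)
    (hpw : (a :: b :: c :: t).Pairwise (· < ·)) (l : Int)
    (hl : (a :: b :: c :: t).getLast? = some l) : a + 2 ≤ l := by
  rcases List.pairwise_cons.mp hpw with ⟨ha, hpw2⟩
  rcases List.pairwise_cons.mp hpw2 with ⟨hb, _⟩
  have h1 : (c :: t).getLast? = some l := by
    simpa [List.getLast?_cons_cons] using hl
  have hmem : l ∈ c :: t := List.mem_of_getLast? h1
  have h2 := hb l hmem
  have h3 := ha b (by simp)
  omega

-- ===== VERDICT (by name: the statement is the Claim_ definition above) =====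
theorem solve_spec : Claim_equal_solve := by
  intro arr n _ _
  unfold Spec_solve solve solve_alt
  rw [pvFold_filter arr, pvRevRange n,
    show (fun i => PySem.List.pyGetD arr i 0 == PySem.List.pyGetD arr (i + 1) 0) = pvQ arr from rfl,
    pvFind_eq_head_filter (pvQ arr), pvFind_eq_head_filter (pvQ arr),
    List.filter_reverse, List.head?_reverse]
  have hpw0 : ((PySem.List.pyRange 0 (n - 1)).filter (pvQ arr)).Pairwise (· < ·) :=
    (PySem.List.pairwise_lt_pyRange_one 0 (n - 1)).filter (pvQ arr)
  generalize hEg : (PySem.List.pyRange 0 (n - 1)).filter (pvQ arr) = E at hpw0 ⊢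
  dsimp only
  rw [PySem.List.sorted_eq_self_of_pairwise E (fun x => x) (hpw0.imp le_of_lt)]
  clear hEg
  match E, hpw0 with
  | [], _ => simp
  | [a], _ => simp
  | [a, b], hpw =>
    have hab : a < b := by
      rcases List.pairwise_cons.mp hpw with ⟨h, _⟩; exact h b (by simp)
    simp only [List.length_cons, List.length_nil, List.head?_cons, List.getLast?_cons_cons,
      List.getLast?_singleton]
    norm_num
    rw [if_neg (by omega : ¬ b = a)]
    by_cases h1 : b - a = 1
    · simp [PySem.List.pyGetD, PySem.List.pyGet?, PySem.List.pyIdx?, h1]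
    · simp [PySem.List.pyGetD, PySem.List.pyGet?, PySem.List.pyIdx?, h1]
  | a :: b :: c :: t, hpw =>
    have hne : (a :: b :: c :: t) ≠ [] := by simp
    obtain ⟨l, hl⟩ : ∃ l, (a :: b :: c :: t).getLast? = some l :=
      ⟨_, List.getLast?_eq_some_getLast hne⟩
    have hdist : a + 2 ≤ l := pvLast_head_ge_two a b c t hpw l hl
    have hlen1 : ¬ (a :: b :: c :: t).length ≤ 1 := by simp
    have hlen3 : 3 ≤ (a :: b :: c :: t).length := by simp
    rw [if_neg hlen1]
    rw [if_neg (show ¬ ((a :: b :: c :: t).length : Int) = 2 by exact_mod_cast (by omega : ¬ (a :: b :: c :: t).length = 2))]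
    rw [pvGetD_neg_one _ hne 0, hl]
    simp only [List.head?_cons, Option.getD_some]
    rw [if_neg (by omega : ¬ l = a), if_neg (by omega : ¬ l - a = 1)]
    have hz : PySem.List.pyGetD (a :: b :: c :: t) 0 0 = a := by
      have h0 : (0 : Int) ≤ (t.length : Int) + 1 + 1 := by positivity
      simp [PySem.List.pyGetD, PySem.List.pyGet?, PySem.List.pyIdx?, h0]
    rw [hz]
    set x := PySem.List.pyGetD (a :: b :: c :: t)
      (PySem.Int.floordiv ((a :: b :: c :: t).length : Int) 2) 0
    set y := PySem.List.pyGetD (a :: b :: c :: t)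
      (PySem.Int.floordiv ((a :: b :: c :: t).length : Int) 2 + 1) 0
    omega
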